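-- pv_equiv track=rewrite | github.com/rmfpafls/sesac_python | Deep_learning/seq2seq_실습/preprocessing.py | sentence2idx
-- ===== SOURCE A (Python) =====
-- def sentence2idx(sentences, word2idx, max_length): #eng_idx_sentence = sentence2idx(eng_sentences, eng_word2idx, eng_max_length)
--     res = []
--
--     for sentence in sentences:
--         elem_lst = []
--         for word in sentence:
--             if word in word2idx:
--                 elem_lst.append(word2idx[word])
--             else:
--                 elem_lst.append(3) #OOV
--         lst = elem_lst + [0 for _ in range(max_length - len(elem_lst))]
--
--         if len(lst) > max_length:
--             lst = lst[:max_length]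
--         res.append(lst)
--     return res
-- ===== SOURCE B (Python) =====
-- def sentence2idx(sentences, word2idx, max_length):
--     res = []
--     for sentence in sentences:
--         it = iter(sentence)
--         row = []
--         for _ in range(max_length):
--             w = next(it, None)
--             row.append(0 if w is None else word2idx.get(w, 3))
--         res.append(row)
--     return res
-- ===== Notes on version B (the rewrite author's own statement) =====
-- stated objective: alternative
-- what changed: B loops over the max_length OUTPUT slots, pulling words lazily from an iterator and emitting 0 once it is exhausted, so the build-list/pad/truncate stages of A disappear into one bounded output-driven loop.
-- intended difference: When max_length < 0 and some sentence is longer than -max_length, A's lst[:max_length] slices from the END and returns that sentence's first len+max_length mapped words, while B returns an empty row; a negative width cannot keep any words, so B's empty row is the intended value. — e.g. on sentence2idx([["a", "b"]], [], -1): A returns [[3]], B returns [[]]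
import Mathlib
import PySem

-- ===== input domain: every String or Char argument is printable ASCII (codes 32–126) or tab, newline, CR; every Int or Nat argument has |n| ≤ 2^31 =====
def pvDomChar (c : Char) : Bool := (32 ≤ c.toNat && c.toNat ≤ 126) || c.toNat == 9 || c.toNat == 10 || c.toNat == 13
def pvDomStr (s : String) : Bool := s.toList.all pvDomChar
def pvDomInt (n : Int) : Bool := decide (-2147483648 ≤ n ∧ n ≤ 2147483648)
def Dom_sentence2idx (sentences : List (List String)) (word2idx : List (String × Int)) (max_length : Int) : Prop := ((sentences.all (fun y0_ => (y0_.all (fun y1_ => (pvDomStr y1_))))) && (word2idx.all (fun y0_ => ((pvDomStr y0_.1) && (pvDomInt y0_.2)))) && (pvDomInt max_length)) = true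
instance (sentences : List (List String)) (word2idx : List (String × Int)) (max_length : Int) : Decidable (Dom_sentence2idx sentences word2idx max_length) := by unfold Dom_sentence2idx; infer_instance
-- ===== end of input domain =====

-- B loops over the max_length output slots, drawing words lazily and emitting 0 after the sentence runs out, instead of A's build-then-pad-then-truncate pipeline; objective: alternative.

-- ===== PORT A =====
def sentence2idx (sentences : List (List String)) (word2idx : List (String × Int)) (max_length : Int) : List (List Int) :=
  sentences.foldl (fun res sentence =>
    let elem_lst := sentence.foldl (fun acc word =>
      if (PySem.Dict.mk word2idx).contains word then
        -- 'word2idx[word]' under the membership guard: getD's default is never used here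
        acc ++ [(PySem.Dict.mk word2idx).getD word 3]
      else
        acc ++ [(3 : Int)]) ([] : List Int)
    let lst := elem_lst ++ (PySem.List.pyRange 0 (max_length - (elem_lst.length : Int)) 1).map (fun _ => (0 : Int))
    let lst := if (lst.length : Int) > max_length then PySem.List.slice lst none (some max_length) else lst
    res ++ [lst]) []

-- ===== PORT B =====
-- the inner 'for _ in range(max_length)' loop: recursion on the remaining slot count,
-- carrying the iterator's remaining words; 'next(it, None)' = the [] / cons split
def pvRowB (d : PySem.Dict String Int) : Nat → List String → List Int
  | 0, _ => []
  | n + 1, [] => (0 : Int) :: pvRowB d n []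
  | n + 1, w :: ws => d.getD w 3 :: pvRowB d n ws

def sentence2idx_alt (sentences : List (List String)) (word2idx : List (String × Int)) (max_length : Int) : List (List Int) :=
  sentences.map (fun s => pvRowB (PySem.Dict.mk word2idx) max_length.toNat s)

-- ===== PRECONDITION & SPEC =====
-- When max_length < 0 and some sentence is longer than -max_length, A's lst[:max_length]
-- slices from the END (keeping that sentence's first len+max_length mapped words) while B
-- returns an empty row; a negative width keeps no words, so B's empty row is the intended value.
def D_sentence2idx (sentences : List (List String)) (word2idx : List (String × Int)) (max_length : Int) : Prop :=
  (decide (max_length < 0) && sentences.any (fun s => decide (-max_length < (s.length : Int)))) = true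
instance (sentences : List (List String)) (word2idx : List (String × Int)) (max_length : Int) : Decidable (D_sentence2idx sentences word2idx max_length) := by unfold D_sentence2idx; infer_instance

def Spec_sentence2idx (sentences : List (List String)) (word2idx : List (String × Int)) (max_length : Int) (out : List (List Int)) : Prop := ¬ D_sentence2idx sentences word2idx max_length → out = sentence2idx_alt sentences word2idx max_length
instance (sentences : List (List String)) (word2idx : List (String × Int)) (max_length : Int) (out : List (List Int)) : Decidable (Spec_sentence2idx sentences word2idx max_length out) := by unfold Spec_sentence2idx; infer_instance

def pvDiffWitness_sentence2idx : List (List String) × (List (String × Int)) × Int := ([["a", "b"]], [], -1)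
def pvDiffWitnessOut_sentence2idx : (List (List Int)) × (List (List Int)) := ([[3]], [[]])

-- ===== CLAIM (what is proved, stated in full; the proofs are below) =====
def Claim_unchanged_sentence2idx : Prop := ∀ (sentences : List (List String)) (word2idx : List (String × Int)) (max_length : Int), Dom_sentence2idx sentences word2idx max_length → Spec_sentence2idx sentences word2idx max_length (sentence2idx sentences word2idx max_length)
def Claim_changed_sentence2idx : Prop := Dom_sentence2idx (pvDiffWitness_sentence2idx.1) (pvDiffWitness_sentence2idx.2.1) (pvDiffWitness_sentence2idx.2.2) ∧ D_sentence2idx (pvDiffWitness_sentence2idx.1) (pvDiffWitness_sentence2idx.2.1) (pvDiffWitness_sentence2idx.2.2) ∧ sentence2idx (pvDiffWitness_sentence2idx.1) (pvDiffWitness_sentence2idx.2.1) (pvDiffWitness_sentence2idx.2.2) = pvDiffWitnessOut_sentence2idx.1 ∧ sentence2idx_alt (pvDiffWitness_sentence2idx.1) (pvDiffWitness_sentence2idx.2.1) (pvDiffWitness_sentence2idx.2.2) = pvDiffWitnessOut_sentence2idx.2 ∧ pvDiffWitnessOut_sentence2idx.1 ≠ pvDiffWitnessOut_sentence2idx.2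
def Claim_exact_sentence2idx : Prop := ∀ (sentences : List (List String)) (word2idx : List (String × Int)) (max_length : Int), Dom_sentence2idx sentences word2idx max_length → D_sentence2idx sentences word2idx max_length → sentence2idx sentences word2idx max_length ≠ sentence2idx_alt sentences word2idx max_length

-- ===== LEMMAS AND PROOFS =====

-- a foldl that appends f x per element is init ++ map f
theorem foldl_append_map {α β : Type} (f : α → β) (xs : List α) (init : List β) :
    xs.foldl (fun acc x => acc ++ [f x]) init = init ++ xs.map f := by
  induction xs generalizing init with
  | nil => simp
  | cons x xs ih => simp [List.foldl_cons, ih]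

-- slice-to commutes with map
theorem slice_to_map {α β : Type} (f : α → β) (xs : List α) (b : Int) :
    PySem.List.slice (xs.map f) none (some b) = (PySem.List.slice xs none (some b)).map f := by
  by_cases hb : 0 ≤ b
  · rw [PySem.List.slice_to _ hb, PySem.List.slice_to _ hb, List.map_take]
  · have hk : 0 < (-b).toNat := by omega
    have hbk : b = -(((-b).toNat : Nat) : Int) := by omega
    rw [hbk, PySem.List.slice_to_neg_natCast _ _ hk, PySem.List.slice_to_neg_natCast _ _ hk,
      List.length_map, List.map_take]

-- the inner word loop of A is a map with getD-with-default-3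
theorem elem_loop_eq (word2idx : List (String × Int)) (s : List String) (init : List Int) :
    s.foldl (fun acc word =>
      if (PySem.Dict.mk word2idx).contains word then
        acc ++ [(PySem.Dict.mk word2idx).getD word 3]
      else
        acc ++ [(3 : Int)]) init
    = init ++ s.map (fun w => (PySem.Dict.mk word2idx).getD w 3) := by
  induction s generalizing init with
  | nil => simp
  | cons w s ih =>
    simp only [List.foldl_cons, List.map_cons]
    by_cases h : (PySem.Dict.mk word2idx).contains w
    · rw [if_pos h, ih]; simp
    · rw [if_neg h, ih, PySem.Dict.getD_of_not_contains _ _ (by simp only [Bool.not_eq_true] at h; exact h)]; simp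

-- A's per-sentence row in closed form
theorem rowA_eq (word2idx : List (String × Int)) (max_length : Int) (s : List String) :
    (let elem_lst := s.foldl (fun acc word =>
        if (PySem.Dict.mk word2idx).contains word then
          acc ++ [(PySem.Dict.mk word2idx).getD word 3]
        else
          acc ++ [(3 : Int)]) ([] : List Int)
      let lst := elem_lst ++ (PySem.List.pyRange 0 (max_length - (elem_lst.length : Int)) 1).map (fun _ => (0 : Int))
      if (lst.length : Int) > max_length then PySem.List.slice lst none (some max_length) else lst)
    = (PySem.List.slice s none (some max_length)).map (fun w => (PySem.Dict.mk word2idx).getD w 3)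
        ++ List.replicate (max_length - (s.length : Int)).toNat (0 : Int) := by
  simp only [elem_loop_eq, List.nil_append]
  set g := fun w => (PySem.Dict.mk word2idx).getD w 3 with hg
  have hpad : (PySem.List.pyRange 0 (max_length - ((s.map g).length : Int)) 1).map (fun _ => (0 : Int))
      = List.replicate (max_length - (s.length : Int)).toNat (0 : Int) := by
    rw [PySem.List.pyRange_one]
    simp [Function.comp_def, List.map_const']
  rw [hpad]
  by_cases hmn : max_length ≤ (s.length : Int)
  · have hrep : (max_length - (s.length : Int)).toNat = 0 := by omega
    rw [hrep]
    simp only [List.replicate_zero, List.append_nil]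
    by_cases htr : ((s.map g).length : Int) > max_length
    · rw [if_pos (by simpa using htr), slice_to_map]
    · have hm : max_length = (s.length : Int) := by
        simp at htr; omega
      rw [if_neg (by simpa using htr), hm, PySem.List.slice_to _ (by positivity),
        Int.toNat_natCast, List.take_length]
  · have hlen : (((s.map g) ++ List.replicate (max_length - (s.length : Int)).toNat (0 : Int)).length : Int) = max_length := by
      simp; omega
    rw [if_neg (by omega)]
    have hs : PySem.List.slice s none (some max_length) = s := by
      rw [PySem.List.slice_to _ (by omega)]
      exact List.take_of_length_le (by omega)
    rw [hs]

-- B's slot-driven row in closed form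
theorem pvRowB_eq (d : PySem.Dict String Int) (n : Nat) (s : List String) :
    pvRowB d n s = (s.take n).map (fun w => d.getD w 3) ++ List.replicate (n - s.length) (0 : Int) := by
  induction n generalizing s with
  | zero => simp [pvRowB]
  | succ n ih =>
    cases s with
    | nil => simp [pvRowB, ih, List.replicate_succ]
    | cons w ws => simp [pvRowB, ih, Nat.succ_sub_succ]

-- A's whole result as a map
theorem sentence2idx_as_map (sentences : List (List String)) (word2idx : List (String × Int)) (max_length : Int) :
    sentence2idx sentences word2idx max_length
      = sentences.map (fun s =>
          (PySem.List.slice s none (some max_length)).map (fun w => (PySem.Dict.mk word2idx).getD w 3)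
            ++ List.replicate (max_length - (s.length : Int)).toNat (0 : Int)) := by
  unfold sentence2idx
  rw [foldl_append_map]
  simp only [List.nil_append]
  congr 1
  funext s
  exact rowA_eq word2idx max_length s

-- ===== VERDICT (by name: the statements are the Claim_ definitions above) =====
theorem sentence2idx_spec : Claim_unchanged_sentence2idx := by
  intro sentences word2idx max_length _ hnd
  show sentence2idx sentences word2idx max_length = sentence2idx_alt sentences word2idx max_length
  rw [sentence2idx_as_map]
  unfold sentence2idx_alt
  apply List.map_congr_left
  intro s hs
  rw [pvRowB_eq]
  by_cases hm : 0 ≤ max_length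
  · have h1 : PySem.List.slice s none (some max_length) = s.take max_length.toNat :=
      PySem.List.slice_to _ hm
    have h2 : (max_length - (s.length : Int)).toNat = max_length.toNat - s.length := by omega
    rw [h1, h2]
  · -- max_length < 0; ¬D_ forces every sentence to satisfy s.length ≤ -max_length
    have hshort : (s.length : Int) ≤ -max_length := by
      by_contra hlong
      apply hnd
      simp only [D_sentence2idx, Bool.and_eq_true, decide_eq_true_eq, List.any_eq_true]
      exact ⟨by omega, s, ⟨hs, by omega⟩⟩
    have hk : 0 < (-max_length).toNat := by omega
    have hbk : max_length = -((((-max_length).toNat : Nat)) : Int) := by omega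
    have h1 : PySem.List.slice s none (some max_length) = s.take (s.length - (-max_length).toNat) := by
      rw [hbk, PySem.List.slice_to_neg_natCast _ _ hk]
      congr 1
      omega
    have h2 : s.length - (-max_length).toNat = 0 := by omega
    have h3 : (max_length - (s.length : Int)).toNat = 0 := by omega
    have h4 : max_length.toNat = 0 := by omega
    simp [h1, h2, h3, h4]

theorem sentence2idx_changed : Claim_changed_sentence2idx := by
  unfold Claim_changed_sentence2idx; decide

theorem sentence2idx_tight : Claim_exact_sentence2idx := by
  intro sentences word2idx max_length _ hd heq
  simp only [D_sentence2idx, Bool.and_eq_true, decide_eq_true_eq, List.any_eq_true] at hd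
  obtain ⟨hm, s0, hs0, hlong⟩ := hd
  rw [sentence2idx_as_map] at heq
  unfold sentence2idx_alt at heq
  rw [List.map_eq_map_iff] at heq
  have h := heq s0 hs0
  have h4 : max_length.toNat = 0 := by omega
  rw [h4] at h
  simp only [pvRowB] at h
  -- A's row at s0 is nonempty: its length is s0.length - (-max_length).toNat > 0
  have hk : 0 < (-max_length).toNat := by omega
  have hbk : max_length = -((((-max_length).toNat : Nat)) : Int) := by omega
  rw [hbk, PySem.List.slice_to_neg_natCast _ _ hk] at h
  have h3 : ((-(((-max_length).toNat : Nat) : Int)) - (s0.length : Int)).toNat = 0 := by omega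
  rw [h3] at h
  have hlen := congrArg List.length h
  simp [List.length_take] at hlen
  omega
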